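-- pv_equiv track=rewrite | github.com/7829hw/CT-SWcoding | 20221111/CT.8.5/solve.py | solve
-- ===== SOURCE A (Python) =====
-- def solve(n):
--     circle, sequence = [i for i in range(1, n + 1)], []
--     j = 0
--     i = 1
--     while len(circle) > 0:
--         k = i**3
--         j = (j + k - 1) % len(circle)
--         sequence.append(circle.pop(j))
--         i += 1
--     return sequence[-1]
-- ===== SOURCE B (Python) =====
-- def solve(n):
--     # Phase 1: compute the removal index at each step by pure arithmetic
--     # (no list mutation): with m elements remaining, step i removes index
--     # (j_prev + i**3 - 1) % m.
--     js = []
--     j, m = 0, n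
--     for i in range(1, n + 1):
--         j = (j + i ** 3 - 1) % m
--         js.append(j)
--         m -= 1
--     # Phase 2: walk backwards mapping the survivor's index (0 in the final
--     # one-element list) through each earlier deletion back to the original circle.
--     pos = 0
--     for jj in reversed(js[:-1]):
--         if pos >= jj:
--             pos += 1
--     return pos + 1
-- ===== Notes on version B (the rewrite author's own statement) =====
-- stated objective: faster
-- what changed: B never builds or mutates the circle list: it computes each step's removal index by pure arithmetic (the index only depends on the previous index and the remaining count), then walks those indices backwards to map the survivor's position in the final one-element list back to the original circle, so the O(n) list.pop of A disappears.
-- outside the precondition, e.g. on solve(0): A raises IndexError, B returns 1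
import Mathlib
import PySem

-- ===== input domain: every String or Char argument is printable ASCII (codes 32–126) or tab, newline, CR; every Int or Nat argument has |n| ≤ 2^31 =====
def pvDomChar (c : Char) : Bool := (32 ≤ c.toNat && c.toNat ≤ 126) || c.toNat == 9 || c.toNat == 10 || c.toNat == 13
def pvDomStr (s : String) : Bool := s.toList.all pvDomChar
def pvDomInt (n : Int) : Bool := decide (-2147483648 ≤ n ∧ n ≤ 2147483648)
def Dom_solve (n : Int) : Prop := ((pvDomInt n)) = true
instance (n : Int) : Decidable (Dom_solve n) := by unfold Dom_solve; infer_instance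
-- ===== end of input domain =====

-- B replaces A's repeated list.pop simulation by pure index arithmetic (forward index
-- sequence, then a backward walk recovering the survivor): objective 'faster'.

-- ===== PORT A =====
-- A's while loop, step for step: pop via PySem.List.pop?, sequence accumulated.
def solveLoopA (circle seq : List Int) (j i : Int) : List Int :=
  if 0 < circle.length then
    let k := i ^ 3
    let j' := PySem.Int.mod (j + k - 1) (circle.length : Int)
    match h2 : PySem.List.pop? circle j' with
    | some r => solveLoopA r.2 (seq ++ [r.1]) j' (i + 1)
    | none => seq          -- unreachable: the index was reduced mod the (positive) length
  else seq
termination_by circle.length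
decreasing_by
  have := PySem.List.length_of_pop?_eq_some circle h2; omega

def solve (n : Int) : Int :=
  let circle := PySem.List.pyRange 1 (n + 1) 1
  let seq := solveLoopA circle [] 0 1
  (PySem.List.pyGet? seq (-1)).getD 0   -- sequence[-1]; Pre_solve excludes n ≤ 0 (IndexError)

-- ===== PORT B =====
def solve_alt (n : Int) : Int :=
  let st := (PySem.List.pyRange 1 (n + 1) 1).foldl
      (fun (s : Int × Int × List Int) i =>
        let j := PySem.Int.mod (s.1 + i ^ 3 - 1) s.2.1
        (j, s.2.1 - 1, s.2.2 ++ [j]))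
      (0, n, ([] : List Int))
  let js := st.2.2
  -- for jj in reversed(js[:-1]): …
  let pos := (js.dropLast.reverse).foldl (fun p jj => if p ≥ jj then p + 1 else p) 0
  pos + 1

-- ===== PRECONDITION & SPEC =====
-- For n ≤ 0 the sequence is empty and A raises IndexError on sequence[-1]; excluded.
def Pre_solve (n : Int) : Prop := 1 ≤ n
instance (n : Int) : Decidable (Pre_solve n) := by unfold Pre_solve; infer_instance
def pvWitness_solve : Int := 5

def Spec_solve (n : Int) (out : Int) : Prop := out = solve_alt n
instance (n : Int) (out : Int) : Decidable (Spec_solve n out) := by unfold Spec_solve; infer_instance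

-- ===== CLAIM (what is proved, stated in full; the proofs are below) =====
def Claim_equal_solve : Prop := ∀ (n : Int), Dom_solve n → Pre_solve n → Spec_solve n (solve n)

-- ===== LEMMAS AND PROOFS =====

-- the arithmetic index sequence: with m elements left, remove index (j + i³ - 1) mod m
def idxList : Nat → Int → Int → List Int
  | 0, _, _ => []
  | m + 1, j, i =>
    let j' := PySem.Int.mod (j + i ^ 3 - 1) ((m : Int) + 1)
    j' :: idxList m j' (i + 1)

-- survivor's index in the original circle, recovered from the removal indices
def backPos (js : List Int) : Int :=
  js.dropLast.foldr (fun jj p => if p ≥ jj then p + 1 else p) 0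

theorem length_idxList (m : Nat) : ∀ (j i : Int), (idxList m j i).length = m := by
  induction m with
  | zero => intro j i; rfl
  | succ m ih => intro j i; simp [idxList, ih]

theorem foldB (m : Nat) : ∀ (i j : Int) (acc : List Int),
    ((PySem.List.pyRange i (i + m) 1).foldl
      (fun (s : Int × Int × List Int) x =>
        let jx := PySem.Int.mod (s.1 + x ^ 3 - 1) s.2.1
        (jx, s.2.1 - 1, s.2.2 ++ [jx]))
      (j, (m : Int), acc)).2.2 = acc ++ idxList m j i := by
  induction m with
  | zero =>
    intro i j acc
    rw [PySem.List.pyRange_one_eq_nil (by omega)]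
    simp [idxList]
  | succ m ih =>
    intro i j acc
    rw [PySem.List.pyRange_one_cons (by push_cast; omega)]
    simp only [List.foldl_cons]
    have h1 : (((m + 1 : Nat)) : Int) - 1 = (m : Int) := by push_cast; ring
    have h2 : i + ((m + 1 : Nat) : Int) = (i + 1) + (m : Int) := by push_cast; ring
    rw [h1, h2, ih]
    simp [idxList]

theorem solve_alt_eq (n : Int) (h : 1 ≤ n) :
    solve_alt n = backPos (idxList n.toNat 0 1) + 1 := by
  obtain ⟨m, rfl⟩ : ∃ m : Nat, n = (m : Int) := ⟨n.toNat, (Int.toNat_of_nonneg (by omega)).symm⟩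
  simp only [solve_alt]
  rw [show (m : Int) + 1 = 1 + (m : Int) by ring, foldB m 1 0 []]
  simp only [List.nil_append, List.foldl_reverse, Int.toNat_natCast]
  rfl

theorem loopA_step (c : List Int) (hc : 0 < c.length) (seq : List Int) (j i : Int) :
    solveLoopA c seq j i =
      solveLoopA (c.eraseIdx (PySem.Int.mod (j + i ^ 3 - 1) (c.length : Int)).toNat)
        (seq ++ [c.getD (PySem.Int.mod (j + i ^ 3 - 1) (c.length : Int)).toNat 0])
        (PySem.Int.mod (j + i ^ 3 - 1) (c.length : Int)) (i + 1) := by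
  have h0 := PySem.Int.mod_nonneg (j + i ^ 3 - 1) (b := (c.length : Int)) (by exact_mod_cast hc)
  have h1 := PySem.Int.mod_lt (j + i ^ 3 - 1) (b := (c.length : Int)) (by exact_mod_cast hc)
  set j' := PySem.Int.mod (j + i ^ 3 - 1) (c.length : Int) with hj'
  have hk : j'.toNat < c.length := by omega
  have hjn : ((j'.toNat : Nat) : Int) = j' := Int.toNat_of_nonneg h0
  have hp := PySem.List.pop?_natCast c j'.toNat hk
  rw [hjn] at hp
  rw [solveLoopA]
  simp only [if_pos hc, List.getD_eq_getElem c 0 hk]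
  rw [← hj']
  split
  · rename_i r heq
    rw [hp] at heq
    cases heq
    rfl
  · rename_i heq
    rw [hp] at heq
    cases heq

theorem loopA_acc (m : Nat) : ∀ (c : List Int), c.length = m → ∀ (seq : List Int) (j i : Int),
    solveLoopA c seq j i = seq ++ solveLoopA c [] j i := by
  induction m with
  | zero =>
    intro c hc seq j i
    have : c = [] := List.length_eq_zero_iff.mp hc
    subst this
    rw [solveLoopA, solveLoopA]
    simp
  | succ m ih =>
    intro c hc seq j i
    have hpos : 0 < c.length := by omega
    rw [loopA_step c hpos seq j i, loopA_step c hpos [] j i]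
    set k := (PySem.Int.mod (j + i ^ 3 - 1) (c.length : Int)).toNat with hk
    have hklt : k < c.length := by
      have h0 := PySem.Int.mod_nonneg (j + i ^ 3 - 1) (b := (c.length : Int)) (by exact_mod_cast hpos)
      have h1 := PySem.Int.mod_lt (j + i ^ 3 - 1) (b := (c.length : Int)) (by exact_mod_cast hpos)
      omega
    have hlen : (c.eraseIdx k).length = m := by
      rw [List.length_eraseIdx]; simp [hklt]; omega
    rw [ih _ hlen, ih _ hlen ([] ++ [c.getD k 0])]
    simp

theorem main (m : Nat) : ∀ (c : List Int), c.length = m → 0 < m → ∀ (j i : Int),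
    0 ≤ backPos (idxList m j i) ∧ (backPos (idxList m j i)).toNat < m ∧
    (solveLoopA c [] j i).getLast? = some (c.getD (backPos (idxList m j i)).toNat 0) := by
  induction m with
  | zero => intro c hc h0; omega
  | succ m ih =>
    intro c hc _ j i
    have hpos : 0 < c.length := by omega
    have hlen : (c.length : Int) = (m : Int) + 1 := by push_cast [hc]; ring
    have h0 := PySem.Int.mod_nonneg (j + i ^ 3 - 1) (b := (c.length : Int)) (by exact_mod_cast hpos)
    have h1 := PySem.Int.mod_lt (j + i ^ 3 - 1) (b := (c.length : Int)) (by exact_mod_cast hpos)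
    set j' := PySem.Int.mod (j + i ^ 3 - 1) (c.length : Int) with hj'
    have hidx : idxList (m + 1) j i = j' :: idxList m j' (i + 1) := by
      simp only [idxList, ← hlen, ← hj']
    have hk : j'.toNat < c.length := by omega
    have hlen' : (c.eraseIdx j'.toNat).length = m := by
      rw [List.length_eraseIdx, if_pos hk]; omega
    rw [loopA_step c hpos [] j i, ← hj',
        loopA_acc m (c.eraseIdx j'.toNat) hlen' ([] ++ [c.getD j'.toNat 0]) j' (i + 1)]
    rcases Nat.eq_zero_or_pos m with hm | hm
    · subst hm
      have hc' : c.eraseIdx j'.toNat = [] := List.length_eq_zero_iff.mp hlen'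
      have hj0 : j' = 0 := by omega
      rw [hidx, hc']
      simp [solveLoopA, backPos, idxList, hj0]
    · obtain ⟨b0, b1, b2⟩ := ih (c.eraseIdx j'.toNat) hlen' hm j' (i + 1)
      set bp := backPos (idxList m j' (i + 1)) with hbp
      have hne : solveLoopA (c.eraseIdx j'.toNat) [] j' (i + 1) ≠ [] := by
        intro hE; rw [hE] at b2; simp at b2
      have hdl : (j' :: idxList m j' (i + 1)).dropLast
          = j' :: (idxList m j' (i + 1)).dropLast := by
        cases hI : idxList m j' (i + 1) with
        | nil =>
          have := length_idxList m j' (i + 1)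
          rw [hI] at this; simp at this; omega
        | cons a l => simp
      have hbp' : backPos (j' :: idxList m j' (i + 1)) = if bp ≥ j' then bp + 1 else bp := by
        rw [backPos, hdl, List.foldr_cons]
        rfl
      rw [hidx, hbp']
      refine ⟨by split_ifs <;> omega, by split_ifs <;> omega, ?_⟩
      rw [show ([] ++ [c.getD j'.toNat 0]) ++ solveLoopA (c.eraseIdx j'.toNat) [] j' (i + 1)
            = [c.getD j'.toNat 0] ++ solveLoopA (c.eraseIdx j'.toNat) [] j' (i + 1) by simp,
          List.getLast?_append, b2]
      simp only [Option.some_or]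
      congr 1
      have hbpm : bp.toNat < (c.eraseIdx j'.toNat).length := by omega
      rw [List.getD_eq_getElem _ _ hbpm, List.getElem_eraseIdx]
      split_ifs with hlt hge hge
      · omega
      · rw [List.getD_eq_getElem _ _ (by omega : bp.toNat < c.length)]
      · rw [List.getD_eq_getElem _ _ (by omega : (bp + 1).toNat < c.length)]
        congr 1; omega
      · omega

-- ===== VERDICT (by name: the statement is the Claim_ definition above) =====
theorem solve_spec : Claim_equal_solve := by
  intro n _ hpre
  have hpre' : 1 ≤ n := hpre
  unfold Spec_solve
  rw [solve_alt_eq n hpre']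
  obtain ⟨N, rfl⟩ : ∃ N : Nat, n = (N : Int) := ⟨n.toNat, (Int.toNat_of_nonneg (by omega)).symm⟩
  have hN : 0 < N := by exact_mod_cast hpre'
  have hlen : (PySem.List.pyRange 1 ((N : Int) + 1) 1).length = N := by
    rw [PySem.List.length_pyRange_one]; omega
  obtain ⟨b0, b1, b2⟩ := main N _ hlen hN 0 1
  simp only [solve, PySem.List.pyGet?_neg_one, b2, Option.getD_some, Int.toNat_natCast]
  rw [List.getD_eq_getElem _ _ (by omega), PySem.List.getElem_pyRange_one]
  omega
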